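-- pv_equiv track=rewrite | github.com/Sy3058/coding-test | 프로그래머스/0/181881. 조건에 맞게 수열 변환하기 2/조건에 맞게 수열 변환하기 2.py | solution
-- ===== SOURCE A (Python) =====
-- def solution(arr):
--     answer = 0
--     while min(arr) % 2 != 1:
--         arr.remove(min(arr))
--         if len(arr) == 0:
--             return 0
--     check = min(arr)
--     while check < 50:
--         check = check*2 + 1
--         answer += 1
--     return answer
-- ===== SOURCE B (Python) =====
-- def solution(arr):
--     odds = [x for x in arr if x % 2 == 1]
--     if not odds:
--         return 0
--     m = min(odds)
--     q = -(-51 // (m + 1))          # ceil(51 / (m+1))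
--     return (q - 1).bit_length()
-- ===== Notes on version B (the rewrite author's own statement) =====
-- stated objective: alternative
-- what changed: B replaces A's repeated min()+remove() passes and its doubling while-loop by one filter pass selecting the odd elements, one min over them, and a closed-form ceil-division + bit_length instead of the loop; B also does not mutate arr (A removes elements in place). Pre_ excludes the empty list (A's min([]) raises ValueError) and lists with a non-positive odd element (A's doubling loop diverges there).
-- outside the precondition, e.g. on solution([]): A raises ValueError, B returns 0; on solution([-3, 2]): A does not finish within the time limit, B returns 5
import Mathlib
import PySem

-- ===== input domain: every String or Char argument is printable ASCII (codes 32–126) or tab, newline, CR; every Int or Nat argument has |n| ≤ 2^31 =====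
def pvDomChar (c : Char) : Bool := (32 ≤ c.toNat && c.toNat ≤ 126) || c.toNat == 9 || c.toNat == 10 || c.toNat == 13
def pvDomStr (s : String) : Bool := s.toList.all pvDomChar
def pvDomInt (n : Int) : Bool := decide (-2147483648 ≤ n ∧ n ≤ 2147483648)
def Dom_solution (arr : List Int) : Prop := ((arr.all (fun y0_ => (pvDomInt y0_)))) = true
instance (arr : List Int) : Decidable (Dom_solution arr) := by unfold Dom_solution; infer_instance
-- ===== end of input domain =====

-- B replaces A's repeated min()+remove() passes and its doubling while-loop by one filter pass,
-- one min, and a closed-form ceil-division + bit_length; A mutates arr in place, B does not —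
-- the equivalence proved here is about the RETURN value only.

-- ===== PORT A =====
-- A's doubling loop, ported with fuel (the fuel only makes the loop total: inside Pre_ it runs
-- at most 6 times; on negative odd minima the Python loop diverges, which Pre_ excludes).
def pvCountLoop : Nat → Int → Int → Int
  | 0, _, answer => answer
  | fuel+1, check, answer =>
    if check < 50 then pvCountLoop fuel (check * 2 + 1) (answer + 1) else answer

-- the while min(arr)%2 != 1 removal loop, then check = min(arr) and the doubling loop
def pvRemoveLoop (arr : List Int) : Int :=
  match _h : PySem.List.min? arr (fun x => x) with
  | none => 0          -- min([]) raises ValueError in Python; excluded by Pre_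
  | some m =>
    if PySem.Int.mod m 2 ≠ 1 then
      match h' : PySem.List.remove? arr m with
      | none => 0      -- unreachable: the minimum is a member of arr
      | some arr' =>
        if arr'.length = 0 then 0
        else pvRemoveLoop arr'
    else pvCountLoop 64 m 0
termination_by arr.length
decreasing_by
  have hm : m ∈ arr := PySem.List.min?_mem _h
  have he := PySem.List.remove?_eq_some_erase arr m hm
  rw [he] at h'
  injection h' with h''
  subst h''
  have := List.length_erase_of_mem hm
  have : 0 < arr.length := List.length_pos_of_mem hm
  simp [List.length_erase_of_mem hm]
  omega

def solution (arr : List Int) : Int := pvRemoveLoop arr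

-- ===== PORT B =====
def solution_alt (arr : List Int) : Int :=
  let odds := arr.filter (fun x => PySem.Int.mod x 2 == 1)
  match PySem.List.min? odds (fun x => x) with
  | none => 0
  | some m =>
    let q : Int := - PySem.Int.floordiv (-51) (m + 1)   -- ceil(51/(m+1))
    ((PySem.Int.bitLength (q - 1) : Nat) : Int)

-- ===== PRECONDITION & SPEC =====
-- Pre_ excludes the empty list (min([]) raises ValueError) and lists containing a non-positive
-- odd element (there A's doubling loop, started at a negative odd minimum, never reaches 50 and
-- diverges). A returns on every input satisfying Pre_.
def Pre_solution (arr : List Int) : Prop :=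
  arr ≠ [] ∧ ∀ x ∈ arr, PySem.Int.mod x 2 = 1 → 1 ≤ x
instance (arr : List Int) : Decidable (Pre_solution arr) := by unfold Pre_solution; infer_instance

def pvWitness_solution : List Int := [2, 3]

def Spec_solution (arr : List Int) (out : Int) : Prop := out = solution_alt arr
instance (arr : List Int) (out : Int) : Decidable (Spec_solution arr out) := by unfold Spec_solution; infer_instance

-- ===== CLAIM (what is proved, stated in full; the proofs are below) =====
def Claim_equal_solution : Prop := ∀ (arr : List Int), Dom_solution arr → Pre_solution arr → Spec_solution arr (solution arr)

-- ===== LEMMAS AND PROOFS =====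

-- the 25 small odd starting points, checked by computation
lemma count_eq_closed_small : ∀ k : Nat, k < 25 →
    pvCountLoop 64 (2 * (k : Int) + 1) 0 =
      ((PySem.Int.bitLength (- PySem.Int.floordiv (-51) (2 * (k : Int) + 1 + 1) - 1) : Nat) : Int) := by
  decide

-- A's doubling loop equals B's closed form for every positive odd start
lemma count_eq_closed (m : Int) (h1 : 1 ≤ m) (h2 : PySem.Int.mod m 2 = 1) :
    pvCountLoop 64 m 0 =
      ((PySem.Int.bitLength (- PySem.Int.floordiv (-51) (m + 1) - 1) : Nat) : Int) := by
  rw [PySem.Int.mod_eq_emod_of_pos (by omega)] at h2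
  by_cases hle : m ≤ 49
  · obtain ⟨k, hk, hkm⟩ : ∃ k : Nat, k < 25 ∧ m = 2 * (k : Int) + 1 := by
      refine ⟨((m - 1) / 2).toNat, by omega, by omega⟩
    subst hkm
    exact count_eq_closed_small k hk
  · -- m ≥ 51 (odd): the loop body never runs and the ceiling division is 1
    have hm51 : 51 ≤ m := by omega
    have hq : - PySem.Int.floordiv (-51) (m + 1) = 1 := by
      rw [PySem.Int.neg_floordiv_neg_eq_iff_of_pos (by omega)]
      omega
    rw [hq]
    have h50 : ¬ m < 50 := by omega
    simp [pvCountLoop, h50, PySem.Int.bitLength]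

-- erasing an even element does not change the list of odd elements
lemma filter_odd_erase (arr : List Int) (m : Int) (hm : PySem.Int.mod m 2 ≠ 1) :
    (arr.erase m).filter (fun x => PySem.Int.mod x 2 == 1) =
      arr.filter (fun x => PySem.Int.mod x 2 == 1) := by
  induction arr with
  | nil => simp
  | cons a t ih =>
    by_cases ha : a = m
    · subst ha
      have h0 : (2:ℤ) ∣ a := by
        rw [PySem.Int.mod_eq_emod_of_pos (by omega)] at hm; omega
      simp [List.erase_cons_head, h0]
    · rw [List.erase_cons_tail (by simpa using ha)]
      simp only [List.filter_cons, ih]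

-- unfolding lemmas for A's loop
lemma pvRemoveLoop_odd (x : List Int) (m : Int)
    (hmin : PySem.List.min? x (fun y => y) = some m) (hmod1 : PySem.Int.mod m 2 = 1) :
    pvRemoveLoop x = pvCountLoop 64 m 0 := by
  rw [pvRemoveLoop.eq_def]
  split
  · next heq => simp [hmin] at heq
  · next m'' heq =>
    rw [hmin] at heq
    injection heq with heq
    subst heq
    rw [if_neg (not_not.mpr hmod1)]

lemma pvRemoveLoop_even (x : List Int) (m : Int)
    (hmin : PySem.List.min? x (fun y => y) = some m) (hmod : PySem.Int.mod m 2 ≠ 1) :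
    pvRemoveLoop x = if (x.erase m).length = 0 then 0 else pvRemoveLoop (x.erase m) := by
  have hm : m ∈ x := PySem.List.min?_mem hmin
  rw [pvRemoveLoop.eq_def]
  split
  · next heq => simp [hmin] at heq
  · next m'' heq =>
    rw [hmin] at heq
    injection heq with heq
    subst heq
    rw [if_pos hmod]
    split
    · next heq' => rw [PySem.List.remove?_eq_some_erase x m hm] at heq'; cases heq'
    · next arr' heq' =>
      rw [PySem.List.remove?_eq_some_erase x m hm] at heq'
      injection heq' with heq'
      subst heq'
      rfl

-- main induction: A's removal loop computes B's value
lemma removeLoop_eq : ∀ arr : List Int, (∀ x ∈ arr, PySem.Int.mod x 2 = 1 → 1 ≤ x) →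
    arr ≠ [] → pvRemoveLoop arr = solution_alt arr := by
  intro arr
  induction arr using pvRemoveLoop.induct with
  | case1 x hmin =>
    intro _ hne
    exact absurd ((PySem.List.min?_eq_none_iff x _).mp hmin) hne
  | case2 x m hmin hmod hrem =>
    intro _ _
    have hm : m ∈ x := PySem.List.min?_mem hmin
    rw [PySem.List.remove?_eq_some_erase x m hm] at hrem
    exact absurd hrem (by simp)
  | case3 x m hmin hmod arr' hrem hlen =>
    intro _ _
    have hm : m ∈ x := PySem.List.min?_mem hmin
    rw [PySem.List.remove?_eq_some_erase x m hm] at hrem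
    injection hrem with hrem
    subst hrem
    have hnil : x.erase m = [] := List.length_eq_zero_iff.mp hlen
    have hfil : x.filter (fun y => PySem.Int.mod y 2 == 1) = [] := by
      rw [← filter_odd_erase x m hmod, hnil]; simp
    rw [pvRemoveLoop_even x m hmin hmod, if_pos hlen]
    unfold solution_alt
    rw [hfil]
    simp [PySem.List.min?]
  | case4 x m hmin hmod arr' hrem hlen ih =>
    intro hodd hne
    have hm : m ∈ x := PySem.List.min?_mem hmin
    rw [PySem.List.remove?_eq_some_erase x m hm] at hrem
    injection hrem with hrem
    subst hrem
    have hodd' : ∀ y ∈ x.erase m, PySem.Int.mod y 2 = 1 → 1 ≤ y := fun y hy =>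
      hodd y (List.mem_of_mem_erase hy)
    have hne' : x.erase m ≠ [] := fun hc => hlen (by simp [hc])
    rw [pvRemoveLoop_even x m hmin hmod, if_neg hlen, ih hodd' hne']
    unfold solution_alt
    rw [filter_odd_erase x m hmod]
  | case5 x m hmin hmod =>
    intro hodd hne
    have hmod1 : PySem.Int.mod m 2 = 1 := not_not.mp (by simpa using hmod)
    have hm : m ∈ x := PySem.List.min?_mem hmin
    have hm1 : 1 ≤ m := hodd m hm hmod1
    have hemod : m % 2 = 1 := by
      rw [← PySem.Int.mod_eq_emod_of_pos (by omega : (0:ℤ) < 2)]; exact hmod1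
    have hmem : m ∈ x.filter (fun y => PySem.Int.mod y 2 == 1) :=
      List.mem_filter.mpr ⟨hm, by simp [hemod]⟩
    obtain ⟨m', hmin'⟩ : ∃ m', PySem.List.min? (x.filter (fun y => PySem.Int.mod y 2 == 1))
        (fun y => y) = some m' := by
      cases hc : PySem.List.min? (x.filter (fun y => PySem.Int.mod y 2 == 1)) (fun y => y) with
      | none =>
        rw [PySem.List.min?_eq_none_iff] at hc
        rw [hc] at hmem
        exact absurd hmem (List.not_mem_nil)
      | some m' => exact ⟨m', rfl⟩
    have hm'x : m' ∈ x := List.mem_of_mem_filter (PySem.List.min?_mem hmin')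
    have h1 : m ≤ m' := PySem.List.min?_isMin hmin m' hm'x
    have h2 : m' ≤ m := PySem.List.min?_isMin hmin' m hmem
    have hmm : m' = m := le_antisymm h2 h1
    subst hmm
    rw [pvRemoveLoop_odd x m' hmin hmod1]
    unfold solution_alt
    simp only [hmin']
    exact count_eq_closed m' hm1 hmod1

-- ===== VERDICT (by name: the statement is the Claim_ definition above) =====
theorem solution_spec : Claim_equal_solution := by
  intro arr _ hpre
  unfold Spec_solution solution
  exact removeLoop_eq arr hpre.2 hpre.1
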